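-- pv_equiv track=rewrite | github.com/Vincentchirchir/GEOS456 | Capstone Project v9/auto_populate.py | _build_intersection_summary
-- ===== SOURCE A (Python) =====
-- def _build_intersection_summary(band_records):
--     """
--     Groups band records by source name and counts intersections/overlaps.
--
--     Keeping the summary build separate makes it easier to reuse and prevents
--     control-flow bugs from hiding the summary when the table succeeds.
--     """
--     summary = {}
--
--     for rec in band_records:
--         # Use `or` so that None and "" both fall back to "Unknown", not just
--         # a missing key — otherwise sorted() crashes on NoneType comparisons.
--         name = rec.get("source_name") or "Unknown"
--         if name not in summary:
--             summary[name] = {"intersections": 0, "overlaps": 0}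
--
--         if rec.get("type") == "POINT":
--             summary[name]["intersections"] += 1
--         elif rec.get("type") == "LINE":
--             summary[name]["overlaps"] += 1
--
--     return summary
-- ===== SOURCE B (Python) =====
-- def _build_intersection_summary(band_records):
--     # Two-pass alternative: collect distinct source names in first-seen order,
--     # then build each name's entry by counting its POINT/LINE records directly.
--     names = []
--     for rec in band_records:
--         name = rec.get("source_name") or "Unknown"
--         if name not in names:
--             names.append(name)
--     return {
--         name: {
--             "intersections": sum(1 for rec in band_records
--                                  if (rec.get("source_name") or "Unknown") == name
--                                  and rec.get("type") == "POINT"),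
--             "overlaps": sum(1 for rec in band_records
--                             if (rec.get("source_name") or "Unknown") == name
--                             and rec.get("type") == "LINE"),
--         }
--         for name in names
--     }
-- ===== Notes on version B (the rewrite author's own statement) =====
-- stated objective: alternative
-- what changed: A builds the summary in a single pass mutating per-name dicts as it goes; B decomposes the task into two passes: collect the distinct source names in first-seen order, then build each name's entry directly by counting its POINT and LINE records.
import Mathlib
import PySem

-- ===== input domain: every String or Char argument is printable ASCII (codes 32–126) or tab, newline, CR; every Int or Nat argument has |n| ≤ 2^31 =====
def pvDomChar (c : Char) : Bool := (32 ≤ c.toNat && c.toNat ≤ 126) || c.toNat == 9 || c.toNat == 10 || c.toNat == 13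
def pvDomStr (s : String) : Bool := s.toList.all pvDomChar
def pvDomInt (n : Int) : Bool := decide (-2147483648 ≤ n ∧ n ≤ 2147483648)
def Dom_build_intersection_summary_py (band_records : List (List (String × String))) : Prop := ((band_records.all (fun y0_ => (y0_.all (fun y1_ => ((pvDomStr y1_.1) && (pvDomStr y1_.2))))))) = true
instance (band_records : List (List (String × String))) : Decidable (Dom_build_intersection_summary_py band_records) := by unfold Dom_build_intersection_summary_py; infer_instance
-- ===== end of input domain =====

-- B replaces A's single-pass mutable accumulation by a two-pass decomposition
-- (distinct names first, then a direct count per name); objective: alternative.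

-- ===== PORT A =====
-- name = rec.get("source_name") or "Unknown"  (both a missing key and "" fall back)
def pvName (rec : List (String × String)) : String :=
  let v := ((PySem.Dict.mk rec).get? "source_name").getD ""
  if v = "" then "Unknown" else v

def pvStepA (summary : PySem.Dict String (PySem.Dict String Int)) (rec : List (String × String)) :
    PySem.Dict String (PySem.Dict String Int) :=
  let name := pvName rec
  let summary1 := if summary.contains name then summary
    else summary.insert name (PySem.Dict.mk [("intersections", 0), ("overlaps", 0)])
  if (PySem.Dict.mk rec).get? "type" = some "POINT" then
    summary1.modify name (PySem.Dict.mk []) (fun e => e.modify "intersections" 0 (· + 1))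
  else if (PySem.Dict.mk rec).get? "type" = some "LINE" then
    summary1.modify name (PySem.Dict.mk []) (fun e => e.modify "overlaps" 0 (· + 1))
  else summary1

def build_intersection_summary_py (band_records : List (List (String × String))) : List (String × List (String × Int)) :=
  ((band_records.foldl pvStepA PySem.Dict.empty).items).map (fun p => (p.1, p.2.items))

-- ===== PORT B =====
def build_intersection_summary_py_alt (band_records : List (List (String × String))) : List (String × List (String × Int)) :=
  let names : PySem.Set String :=
    band_records.foldl (fun names rec => PySem.Set.add names (pvName rec)) PySem.Set.empty
  names.map (fun name =>
    (name,
     [("intersections", band_records.foldl (fun c rec =>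
         if pvName rec = name ∧ (PySem.Dict.mk rec).get? "type" = some "POINT" then c + 1 else c) (0 : Int)),
      ("overlaps", band_records.foldl (fun c rec =>
         if pvName rec = name ∧ (PySem.Dict.mk rec).get? "type" = some "LINE" then c + 1 else c) (0 : Int))]))

-- ===== PRECONDITION & SPEC =====
def Spec_build_intersection_summary_py (band_records : List (List (String × String))) (out : List (String × List (String × Int))) : Prop := out = build_intersection_summary_py_alt band_records
instance (band_records : List (List (String × String))) (out : List (String × List (String × Int))) : Decidable (Spec_build_intersection_summary_py band_records out) := by unfold Spec_build_intersection_summary_py; infer_instance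

-- ===== CLAIM (what is proved, stated in full; the proofs are below) =====
def Claim_equal_build_intersection_summary_py : Prop := ∀ (band_records : List (List (String × String))), Dom_build_intersection_summary_py band_records → Spec_build_intersection_summary_py band_records (build_intersection_summary_py band_records)

-- ===== LEMMAS AND PROOFS =====

-- distinct names of a record list, in first-seen order
def pvDN (l : List (List (String × String))) : List String :=
  l.foldl (fun names rec => PySem.Set.add names (pvName rec)) PySem.Set.empty

-- count of records with the given name and the given "type"
def pvCnt (t : String) (l : List (List (String × String))) (name : String) : Int :=
  (l.countP (fun rec => decide (pvName rec = name ∧ (PySem.Dict.mk rec).get? "type" = some t)) : Nat)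

-- the inner dict A maintains for a name, characterised by counts
def pvG (l : List (List (String × String))) (name : String) : String × PySem.Dict String Int :=
  (name, PySem.Dict.mk [("intersections", pvCnt "POINT" l name), ("overlaps", pvCnt "LINE" l name)])

def pvChar (l : List (List (String × String))) : PySem.Dict String (PySem.Dict String Int) :=
  PySem.Dict.mk ((pvDN l).map (pvG l))

lemma pvDN_eq (l : List (List (String × String))) : pvDN l = PySem.Set.ofList (l.map pvName) := by
  rw [pvDN, ← PySem.Set.update_map_eq_foldl_add]
  exact PySem.Set.update_empty _

lemma pvDN_nodup (l : List (List (String × String))) : (pvDN l).Nodup := by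
  rw [pvDN_eq]; exact PySem.Set.nodup_ofList _

lemma mem_pvDN {l : List (List (String × String))} {n : String} :
    n ∈ pvDN l ↔ ∃ rec ∈ l, pvName rec = n := by
  rw [pvDN_eq, PySem.Set.mem_ofList]
  simp [List.mem_map, eq_comm]

lemma pvCnt_append (t : String) (l : List (List (String × String))) (rec : List (String × String)) (name : String) :
    pvCnt t (l ++ [rec]) name =
      pvCnt t l name + (if pvName rec = name ∧ (PySem.Dict.mk rec).get? "type" = some t then 1 else 0) := by
  simp only [pvCnt, List.countP_append, List.countP_cons]
  split_ifs <;> simp_all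

lemma pvCnt_zero_of_not_mem {l : List (List (String × String))} {name : String}
    (h : name ∉ pvDN l) (t : String) : pvCnt t l name = 0 := by
  have h' : ∀ rec ∈ l, pvName rec ≠ name := by
    intro rec hr he; exact h (mem_pvDN.mpr ⟨rec, hr, he⟩)
  simp only [pvCnt]
  rw [List.countP_eq_zero.mpr]
  · rfl
  · intro rec hr
    simp [h' rec hr]

lemma foldl_if_count (p : List (String × String) → Prop) [DecidablePred p]
    (l : List (List (String × String))) (c0 : Int) :
    l.foldl (fun c rec => if p rec then c + 1 else c) c0 = c0 + (l.countP (fun rec => decide (p rec)) : Nat) := by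
  induction l generalizing c0 with
  | nil => simp
  | cons x xs ih =>
    simp only [List.foldl_cons, List.countP_cons, ih]
    split_ifs with h h2 <;> simp_all
    omega

lemma keys_pvChar (l : List (List (String × String))) : (pvChar l).keys = pvDN l := by
  simp [pvChar, PySem.Dict.keys, pvG, List.map_map, Function.comp_def]

lemma contains_pvChar (l : List (List (String × String))) (n : String) :
    (pvChar l).contains n = decide (n ∈ pvDN l) := by
  rw [PySem.Dict.contains_eq_decide_mem_keys, keys_pvChar]

lemma nodup_add_pvDN (l : List (List (String × String))) (x : String) :
    (PySem.Set.add (pvDN l) x).Nodup :=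
  PySem.Set.nodup_add _ _ (pvDN_nodup l)

lemma pvDN_append (l : List (List (String × String))) (rec : List (String × String)) :
    pvDN (l ++ [rec]) = PySem.Set.add (pvDN l) (pvName rec) := by
  simp [pvDN, List.foldl_append]

-- the inner-dict update A performs, computed on the characterised entry
lemma inner_point (l : List (List (String × String))) (n : String) :
    ((pvG l n).2).modify "intersections" 0 (· + 1) =
      PySem.Dict.mk [("intersections", pvCnt "POINT" l n + 1), ("overlaps", pvCnt "LINE" l n)] := rfl

lemma inner_line (l : List (List (String × String))) (n : String) :
    ((pvG l n).2).modify "overlaps" 0 (· + 1) =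
      PySem.Dict.mk [("intersections", pvCnt "POINT" l n), ("overlaps", pvCnt "LINE" l n + 1)] := rfl

-- after the `if name not in summary` guard, the summary is the characterisation over add names
lemma summary1_char (l : List (List (String × String))) (rec : List (String × String)) :
    (if (pvChar l).contains (pvName rec) then pvChar l
     else (pvChar l).insert (pvName rec) (PySem.Dict.mk [("intersections", 0), ("overlaps", 0)])) =
      PySem.Dict.mk ((PySem.Set.add (pvDN l) (pvName rec)).map (pvG l)) := by
  by_cases hN : pvName rec ∈ pvDN l
  · rw [contains_pvChar]
    simp only [hN, decide_true, if_true, PySem.Set.add_of_mem hN]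
    rfl
  · rw [contains_pvChar]
    simp only [hN, decide_false, Bool.false_eq_true, if_false]
    apply PySem.Dict.ext
    rw [PySem.Dict.items_insert_of_not_contains _ _ (by rw [contains_pvChar]; simp [hN])]
    rw [PySem.Set.add_of_not_mem hN]
    simp only [pvChar, List.map_append, List.map_cons, List.map_nil]
    simp [pvG, pvCnt_zero_of_not_mem hN]

lemma getD_mk_map_add (l : List (List (String × String))) (rec : List (String × String)) (d : PySem.Dict String Int) :
    (PySem.Dict.mk ((PySem.Set.add (pvDN l) (pvName rec)).map (pvG l))).getD (pvName rec) d = (pvG l (pvName rec)).2 := by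
  apply PySem.Dict.getD_of_mem_items
  · exact List.mem_map.mpr ⟨pvName rec, (PySem.Set.mem_add _ _ _).mpr (Or.inr rfl), rfl⟩
  · show ((PySem.Set.add (pvDN l) (pvName rec)).map (pvG l)).map (·.1) |>.Nodup
    simpa [pvG, List.map_map, Function.comp_def] using nodup_add_pvDN l (pvName rec)

lemma modify_char (l : List (List (String × String))) (rec : List (String × String))
    (v' : PySem.Dict String Int)
    (h : ∀ n ∈ PySem.Set.add (pvDN l) (pvName rec),
           (if n = pvName rec then (pvName rec, v') else pvG l n) = pvG (l ++ [rec]) n) :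
    (PySem.Dict.mk ((PySem.Set.add (pvDN l) (pvName rec)).map (pvG l))).insert (pvName rec) v' = pvChar (l ++ [rec]) := by
  apply PySem.Dict.ext
  rw [PySem.Dict.items_insert_of_contains]
  · show (((PySem.Set.add (pvDN l) (pvName rec)).map (pvG l)).map
        (fun p => if p.1 == pvName rec then (pvName rec, v') else p)) = _
    rw [List.map_map]
    show _ = (pvDN (l ++ [rec])).map (pvG (l ++ [rec]))
    rw [pvDN_append]
    apply List.map_congr_left
    intro n hn
    simp only [Function.comp_apply, pvG, beq_iff_eq]
    have := h n hn
    by_cases hne : n = pvName rec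
    · simpa [pvG, hne] using this
    · simpa [pvG, hne] using this
  · show ((PySem.Set.add (pvDN l) (pvName rec)).map (pvG l)).any (fun p => p.1 == pvName rec) = true
    refine List.any_eq_true.mpr ⟨pvG l (pvName rec), ?_, by simp [pvG]⟩
    exact List.mem_map.mpr ⟨pvName rec, (PySem.Set.mem_add _ _ _).mpr (Or.inr rfl), rfl⟩

lemma stepA_char (l : List (List (String × String))) (rec : List (String × String)) :
    pvStepA (pvChar l) rec = pvChar (l ++ [rec]) := by
  simp only [pvStepA]
  rw [summary1_char l rec]
  split_ifs with hP hL
  · rw [PySem.Dict.modify, getD_mk_map_add, inner_point]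
    apply modify_char
    intro n hn
    by_cases hne : n = pvName rec
    · subst hne
      simp [pvG, pvCnt_append, hP]
    · have hne' : pvName rec ≠ n := fun h => hne h.symm
      simp [pvG, hne, pvCnt_append, hne']
  · rw [PySem.Dict.modify, getD_mk_map_add, inner_line]
    apply modify_char
    intro n hn
    by_cases hne : n = pvName rec
    · subst hne
      simp [pvG, pvCnt_append, hL]
    · have hne' : pvName rec ≠ n := fun h => hne h.symm
      simp [pvG, hne, pvCnt_append, hne']
  · apply PySem.Dict.ext
    show ((PySem.Set.add (pvDN l) (pvName rec)).map (pvG l)) = _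
    show _ = (pvDN (l ++ [rec])).map (pvG (l ++ [rec]))
    rw [pvDN_append]
    apply List.map_congr_left
    intro n hn
    simp [pvG, pvCnt_append, hP, hL]

theorem foldl_stepA_char (l : List (List (String × String))) :
    l.foldl pvStepA PySem.Dict.empty = pvChar l := by
  induction l using List.reverseRecOn with
  | nil => rfl
  | append_singleton l rec ih => rw [List.foldl_append, List.foldl_cons, List.foldl_nil, ih, stepA_char]

-- ===== VERDICT (by name: the statement is the Claim_ definition above) =====
theorem build_intersection_summary_py_spec : Claim_equal_build_intersection_summary_py := by
  intro l _
  show build_intersection_summary_py l = build_intersection_summary_py_alt l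
  rw [build_intersection_summary_py, foldl_stepA_char]
  show ((pvDN l).map (pvG l)).map (fun p => (p.1, p.2.items)) = _
  rw [build_intersection_summary_py_alt]
  show _ = (pvDN l).map _
  rw [List.map_map]
  apply List.map_congr_left
  intro n _
  simp only [Function.comp, pvG]
  rw [foldl_if_count (fun rec => pvName rec = n ∧ (PySem.Dict.mk rec).get? "type" = some "POINT"),
      foldl_if_count (fun rec => pvName rec = n ∧ (PySem.Dict.mk rec).get? "type" = some "LINE")]
  simp [pvCnt]
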